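-- pv_equiv track=rewrite | github.com/mayank123-max/Leet_Code_Problems | minimumsteps.py | solve
-- ===== SOURCE A (Python) =====
-- def solve(x, y):
--     c = 0
--     q = x//y if x>y else y//x
--     r = x%y if x>y else y%x
--     if r == 0 and q % 2 == 0:
--         q = q>>1
--         while q:
--             c += 1
--             q = q>>1
--         return c
--     return -1
-- ===== SOURCE B (Python) =====
-- def solve(x, y):
--     q = x//y if x>y else y//x
--     r = x%y if x>y else y%x
--     if r == 0 and q % 2 == 0:
--         return (q >> 1).bit_length()
--     return -1
-- ===== Notes on version B (the rewrite author's own statement) =====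
-- stated objective: simpler
-- what changed: The pre-shift-plus-while loop that counts halving steps is replaced by the closed form (q >> 1).bit_length(); the divisor-choosing prelude and guard are kept verbatim.
import Mathlib
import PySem

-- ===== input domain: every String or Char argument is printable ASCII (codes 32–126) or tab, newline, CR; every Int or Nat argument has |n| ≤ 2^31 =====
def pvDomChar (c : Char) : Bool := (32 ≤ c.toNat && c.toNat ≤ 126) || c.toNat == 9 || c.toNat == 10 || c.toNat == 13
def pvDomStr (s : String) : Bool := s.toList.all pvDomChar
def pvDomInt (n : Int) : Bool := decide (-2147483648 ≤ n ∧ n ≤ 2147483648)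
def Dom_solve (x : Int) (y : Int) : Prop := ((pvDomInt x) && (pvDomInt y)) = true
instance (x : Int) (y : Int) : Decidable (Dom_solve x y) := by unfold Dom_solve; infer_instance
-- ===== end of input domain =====

-- B replaces A's shift-and-count while loop by the closed form (q >> 1).bit_length(); same prelude and guard (objective: simpler).

-- ===== PORT A =====
-- the 'while q: c += 1; q = q>>1' loop; the q < 0 branch is unreachable inside Pre_ (Python diverges there)
def solveLoop (q : Int) (c : Int) : Int :=
  if q = 0 then c
  else if q < 0 then 0
  else solveLoop (q >>> (1:Nat)) (c + 1)
termination_by q.toNat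
decreasing_by
  simp [Int.shiftRight_eq_div_pow]
  omega

def solve (x : Int) (y : Int) : Int :=
  let c : Int := 0
  let q := if x > y then PySem.Int.floordiv x y else PySem.Int.floordiv y x
  let r := if x > y then PySem.Int.mod x y else PySem.Int.mod y x
  if r = 0 ∧ PySem.Int.mod q 2 = 0 then
    solveLoop (q >>> (1:Nat)) c
  else -1

-- ===== PORT B =====
def solve_alt (x : Int) (y : Int) : Int :=
  let q := if x > y then PySem.Int.floordiv x y else PySem.Int.floordiv y x
  let r := if x > y then PySem.Int.mod x y else PySem.Int.mod y x
  if r = 0 ∧ PySem.Int.mod q 2 = 0 then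
    (PySem.Int.bitLength (q >>> (1:Nat)) : Int)
  else -1

-- ===== PRECONDITION & SPEC =====
-- Pre_ excludes exactly the inputs where A does not return: divisor 0 (ZeroDivisionError) and a
-- negative even exact quotient, where A's while loop diverges (q>>1 sticks at -1).
def Pre_solve (x : Int) (y : Int) : Prop :=
  (if x > y then y ≠ 0 else x ≠ 0) ∧
  ¬ ((if x > y then PySem.Int.mod x y else PySem.Int.mod y x) = 0 ∧
     PySem.Int.mod (if x > y then PySem.Int.floordiv x y else PySem.Int.floordiv y x) 2 = 0 ∧
     (if x > y then PySem.Int.floordiv x y else PySem.Int.floordiv y x) < 0)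
instance (x : Int) (y : Int) : Decidable (Pre_solve x y) := by unfold Pre_solve; infer_instance
def pvWitness_solve : Int × Int := (8, 2)

def Spec_solve (x : Int) (y : Int) (out : Int) : Prop := out = solve_alt x y
instance (x : Int) (y : Int) (out : Int) : Decidable (Spec_solve x y out) := by unfold Spec_solve; infer_instance

-- ===== CLAIM (what is proved, stated in full; the proofs are below) =====
def Claim_equal_solve : Prop := ∀ (x : Int) (y : Int), Dom_solve x y → Pre_solve x y → Spec_solve x y (solve x y)

-- ===== LEMMAS AND PROOFS =====

lemma shiftRight_one_int (q : Int) : q >>> (1:Nat) = PySem.Int.floordiv q 2 := by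
  rw [PySem.Int.floordiv_eq_ediv_of_pos (by norm_num)]
  simp [Int.shiftRight_eq_div_pow]

lemma solveLoop_eq_bitLength (n : Nat) :
    ∀ q c : Int, 0 ≤ q → q.toNat ≤ n → solveLoop q c = c + (PySem.Int.bitLength q : Int) := by
  induction n with
  | zero =>
    intro q c hq hn
    have : q = 0 := by omega
    subst this
    simp [solveLoop, PySem.Int.bitLength_zero]
  | succ n ih =>
    intro q c hq hn
    rcases eq_or_lt_of_le hq with h0 | h0
    · rw [← h0]
      simp [solveLoop, PySem.Int.bitLength_zero]
    · rw [solveLoop]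
      rw [if_neg (by omega), if_neg (by omega)]
      rw [shiftRight_one_int]
      have hdiv : PySem.Int.floordiv q 2 = q / 2 :=
        PySem.Int.floordiv_eq_ediv_of_pos (by norm_num)
      have h1 : 0 ≤ PySem.Int.floordiv q 2 := by rw [hdiv]; omega
      have h2 : (PySem.Int.floordiv q 2).toNat ≤ n := by rw [hdiv]; omega
      rw [ih _ _ h1 h2]
      rw [PySem.Int.bitLength_of_pos h0]
      push_cast
      ring

lemma solveLoop_shift_eq_bitLength (q : Int) (hq : 0 ≤ q) :
    solveLoop (q >>> (1:Nat)) 0 = (PySem.Int.bitLength (q >>> (1:Nat)) : Int) := by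
  have h1 : 0 ≤ q >>> (1:Nat) := by
    rw [shiftRight_one_int, PySem.Int.floordiv_eq_ediv_of_pos (by norm_num)]
    omega
  rw [solveLoop_eq_bitLength _ _ _ h1 le_rfl]
  omega

theorem solve_spec : Claim_equal_solve := by
  intro x y _ hpre
  obtain ⟨_, hndiv⟩ := hpre
  unfold Spec_solve solve solve_alt
  by_cases hgt : x > y
  · simp only [if_pos hgt] at hndiv ⊢
    split_ifs with hc
    · exact solveLoop_shift_eq_bitLength _ (by by_contra hneg; exact hndiv ⟨hc.1, hc.2, by omega⟩)
    · rfl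
  · simp only [if_neg hgt] at hndiv ⊢
    split_ifs with hc
    · exact solveLoop_shift_eq_bitLength _ (by by_contra hneg; exact hndiv ⟨hc.1, hc.2, by omega⟩)
    · rfl
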